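-- pv_equiv track=rewrite | github.com/zhenzhiwin/pccsite | CCL7Api.py | getTheCompatibleEntryId
-- ===== SOURCE A (Python) =====
-- def getTheCompatibleEntryId(tup,all_entry_id_list,service_entry_id_list,strat,end):
--     retId = -1
--     for i in range(strat,end):
--         if i not in all_entry_id_list:
--             retId = i
--             all_entry_id_list.append(retId)
--             service_entry_id_list.append(retId)
--             break
--     return retId
-- ===== SOURCE B (Python) =====
-- def getTheCompatibleEntryId(tup, all_entry_id_list, service_entry_id_list, strat, end):
--     used = set(all_entry_id_list)
--     # by pigeonhole the first free id (if any) lies among the first len(used)+1 candidates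
--     hi = min(end, strat + len(used) + 1)
--     available = set(range(strat, hi)) - used
--     if not available:
--         return -1
--     retId = min(available)
--     all_entry_id_list.append(retId)
--     service_entry_id_list.append(retId)
--     return retId
-- ===== Notes on version B (the rewrite author's own statement) =====
-- stated objective: alternative
-- what changed: Replaces A's early-exit linear scan over range(strat,end) with a pigeonhole-bounded candidate window (the first len(used)+1 ids), a set difference against the used-id set, and min() to pick the smallest free id; the window bound keeps B independent of end-strat.
import Mathlib
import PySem

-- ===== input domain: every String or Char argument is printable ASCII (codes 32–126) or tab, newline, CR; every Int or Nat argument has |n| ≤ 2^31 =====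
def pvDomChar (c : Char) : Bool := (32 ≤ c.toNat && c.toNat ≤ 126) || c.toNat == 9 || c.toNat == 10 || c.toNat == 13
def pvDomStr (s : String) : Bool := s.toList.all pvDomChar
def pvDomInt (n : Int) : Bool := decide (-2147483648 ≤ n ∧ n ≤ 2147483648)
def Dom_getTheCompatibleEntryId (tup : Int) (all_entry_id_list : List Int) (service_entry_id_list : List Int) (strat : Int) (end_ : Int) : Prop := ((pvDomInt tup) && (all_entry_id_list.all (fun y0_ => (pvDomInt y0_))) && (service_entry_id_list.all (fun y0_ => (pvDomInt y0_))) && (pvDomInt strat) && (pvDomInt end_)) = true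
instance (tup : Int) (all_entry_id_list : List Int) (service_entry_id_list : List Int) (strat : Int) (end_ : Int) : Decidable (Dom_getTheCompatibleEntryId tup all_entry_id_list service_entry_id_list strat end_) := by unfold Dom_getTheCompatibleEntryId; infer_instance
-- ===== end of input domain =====

-- B replaces A's early-exit scan over the whole range by "min of (pigeonhole-bounded candidate window minus used set)".
-- Both Pythons append the found id to both list arguments (same mutation); the equivalence proved here is about the RETURN value.

-- ===== PORT A =====
-- the 'for i in range(strat,end): if i not in all_entry_id_list: …; break' loop, retId = -1 when no
-- break fires; range(strat,end) is iterated lazily (current value i, remaining count as fuel), as Python does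
def pvLoopA (ids : List Int) (i : Int) : Nat → Int
  | 0 => -1
  | n+1 => if ids.contains i then pvLoopA ids (i+1) n else i

def getTheCompatibleEntryId (tup : Int) (all_entry_id_list : List Int) (service_entry_id_list : List Int) (strat : Int) (end_ : Int) : Int :=
  pvLoopA all_entry_id_list strat (end_ - strat).toNat

-- ===== PORT B =====
def getTheCompatibleEntryId_alt (tup : Int) (all_entry_id_list : List Int) (service_entry_id_list : List Int) (strat : Int) (end_ : Int) : Int :=
  let used : PySem.Set Int := PySem.Set.ofList all_entry_id_list
  let hi : Int := min end_ (strat + PySem.Set.len used + 1)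
  let available : PySem.Set Int := PySem.Set.diff (PySem.Set.ofList (PySem.List.pyRange strat hi 1)) used
  match PySem.List.min? available (fun x => x) with
  | none => -1
  | some r => r

-- ===== PRECONDITION & SPEC =====
def Spec_getTheCompatibleEntryId (tup : Int) (all_entry_id_list : List Int) (service_entry_id_list : List Int) (strat : Int) (end_ : Int) (out : Int) : Prop := out = getTheCompatibleEntryId_alt tup all_entry_id_list service_entry_id_list strat end_
instance (tup : Int) (all_entry_id_list : List Int) (service_entry_id_list : List Int) (strat : Int) (end_ : Int) (out : Int) : Decidable (Spec_getTheCompatibleEntryId tup all_entry_id_list service_entry_id_list strat end_ out) := by unfold Spec_getTheCompatibleEntryId; infer_instance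

-- ===== CLAIM (what is proved, stated in full; the proofs are below) =====
def Claim_equal_getTheCompatibleEntryId : Prop := ∀ (tup : Int) (all_entry_id_list : List Int) (service_entry_id_list : List Int) (strat : Int) (end_ : Int), Dom_getTheCompatibleEntryId tup all_entry_id_list service_entry_id_list strat end_ → Spec_getTheCompatibleEntryId tup all_entry_id_list service_entry_id_list strat end_ (getTheCompatibleEntryId tup all_entry_id_list service_entry_id_list strat end_)

-- ===== LEMMAS AND PROOFS =====

-- A's loop returns the first range element failing the membership test: the head of the filtered range (or -1)
theorem pvLoopA_eq_headD (ids : List Int) (i : Int) (n : Nat) :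
    pvLoopA ids i n
      = (((PySem.List.pyRange i (i + n) 1).filter (fun j => !ids.contains j)).headD (-1)) := by
  induction n generalizing i with
  | zero =>
      rw [PySem.List.pyRange_one_eq_nil (by omega)]
      rfl
  | succ n ih =>
      rw [PySem.List.pyRange_one_cons (by omega)]
      have harg : i + 1 + (n : Int) = i + ((n + 1 : Nat) : Int) := by push_cast; ring
      cases h : ids.contains i
      · simp only [pvLoopA, h, Bool.false_eq_true, if_false, List.filter_cons, Bool.not_false,
          if_true, List.headD_cons]
      · simp only [pvLoopA, h, if_true, List.filter_cons, Bool.not_true, Bool.false_eq_true,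
          if_false, ih (i+1), harg]

theorem foldl_min_eq_self (t : List Int) (x : Int) (hx : ∀ y ∈ t, x ≤ y) : t.foldl min x = x := by
  induction t generalizing x with
  | nil => rfl
  | cons y s ih =>
      have hxy : min x y = x := min_eq_left (hx y (by simp))
      simp only [List.foldl_cons, hxy]
      exact ih x (fun z hz => hx z (by simp [hz]))

-- min? of a strictly increasing list is its head
theorem min?_id_of_pairwise (l : List Int) (h : l.Pairwise (· < ·)) :
    PySem.List.min? l (fun x => x) = l.head? := by
  cases l with
  | nil => rfl
  | cons x t =>
      rw [PySem.List.min?_id_cons]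
      have hx : ∀ y ∈ t, x ≤ y := fun y hy => le_of_lt ((List.pairwise_cons.mp h).1 y hy)
      rw [foldl_min_eq_self t x hx]
      rfl

theorem getTheCompatibleEntryId_spec : Claim_equal_getTheCompatibleEntryId := by
  intro tup all svc strat end_ _
  unfold Spec_getTheCompatibleEntryId getTheCompatibleEntryId getTheCompatibleEntryId_alt
  rw [pvLoopA_eq_headD]
  have hr : PySem.List.pyRange strat (strat + ((end_ - strat).toNat : Int)) 1
      = PySem.List.pyRange strat end_ 1 := by
    by_cases h : strat ≤ end_
    · congr 1; omega
    · rw [PySem.List.pyRange_one_eq_nil (by omega), PySem.List.pyRange_one_eq_nil (by omega)]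
  rw [hr]
  show _ = (match PySem.List.min? (PySem.Set.diff
      (PySem.Set.ofList (PySem.List.pyRange strat
        (min end_ (strat + PySem.Set.len (PySem.Set.ofList all) + 1)) 1))
      (PySem.Set.ofList all)) (fun x => x) with
    | none => -1
    | some r => r)
  -- abbreviations
  have hc : ∀ x : Int, (PySem.Set.ofList all).contains x = all.contains x := by
    intro x
    by_cases hm : x ∈ all <;> simp [PySem.Set.mem_ofList, hm]
  have hlen0 : PySem.Set.len (PySem.Set.ofList all) = ((PySem.Set.ofList all).length : Int) := rfl
  set L : Int := PySem.Set.len (PySem.Set.ofList all) with hL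
  have hLnn : 0 ≤ L := by rw [hlen0]; positivity
  set hi : Int := min end_ (strat + L + 1) with hhi
  -- B's available set IS the window filtered against the raw list
  have hset : PySem.Set.diff (PySem.Set.ofList (PySem.List.pyRange strat hi 1)) (PySem.Set.ofList all)
      = (PySem.List.pyRange strat hi 1).filter (fun i => !all.contains i) := by
    show ((PySem.Set.ofList (PySem.List.pyRange strat hi 1)).filter
        (fun x => !(PySem.Set.ofList all).contains x)) = _
    rw [PySem.Set.ofList_eq_self_of_nodup _ (PySem.List.nodup_pyRange_one strat hi)]
    exact List.filter_congr (fun x _ => by rw [hc x])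
  rw [hset, min?_id_of_pairwise _ ((PySem.List.pairwise_lt_pyRange_one strat hi).filter _)]
  -- reduce the Option match to headD, leaving: headD of full filtered range = headD of window filtered range
  have hgoal : ((PySem.List.pyRange strat end_ 1).filter (fun i => !all.contains i)).headD (-1)
      = ((PySem.List.pyRange strat hi 1).filter (fun i => !all.contains i)).headD (-1) := by
    by_cases hend : end_ ≤ strat + L + 1
    · rw [hhi, min_eq_left hend]
    · push_neg at hend
      have h1 : strat ≤ hi := by rw [hhi]; omega
      have h2 : hi ≤ end_ := by rw [hhi]; omega
      rw [PySem.List.pyRange_one_append strat hi end_ h1 h2, List.filter_append]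
      cases hW : (PySem.List.pyRange strat hi 1).filter (fun i => !all.contains i) with
      | cons x xs => rw [List.cons_append, List.headD_cons, List.headD_cons]
      | nil =>
          exfalso
          -- every id in the window is used: pigeonhole contradiction
          have hsub : PySem.List.pyRange strat hi 1 ⊆ PySem.Set.ofList all := by
            intro j hj
            have := List.filter_eq_nil_iff.mp hW j hj
            have hcj : all.contains j = true := by
              cases hcj : all.contains j with
              | true => rfl
              | false => exact absurd (by rw [hcj]; rfl) this
            exact (PySem.Set.mem_ofList _ _).mpr (List.contains_iff_mem.mp hcj)
          have hle := (List.subperm_of_subset (PySem.List.nodup_pyRange_one strat hi) hsub).length_le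
          rw [PySem.List.length_pyRange_one] at hle
          have hhieq : hi = strat + L + 1 := by rw [hhi]; omega
          rw [hlen0] at hL
          omega
  rw [hgoal]
  cases (PySem.List.pyRange strat hi 1).filter (fun i => !all.contains i) <;> rfl
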